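-- pv_equiv track=rewrite | github.com/nmit-1NT22CS211/22CS13-SigilHive | SigilHive/database/controller.py | _is_suspicious
-- ===== SOURCE A (Python) =====
-- def _is_suspicious(query: str) -> bool:
--     q_upper = query.upper()
--     suspicious_patterns = [
--         "UNION SELECT",
--         "OR 1=1",
--         "AND 1=1",
--         "' OR '",
--         "'; DROP",
--         "--",
--         "LOAD_FILE",
--         "INTO OUTFILE",
--         "INTO DUMPFILE",
--         "BENCHMARK(",
--         "SLEEP(",
--         "WAITFOR DELAY",
--         "../",
--         "password_hash",
--         "authentication_string",
--         "admin_users",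
--     ]
--     return any(pattern in q_upper for pattern in suspicious_patterns)
-- ===== SOURCE B (Python) =====
-- _PATTERNS = [
--     "UNION SELECT",
--     "OR 1=1",
--     "AND 1=1",
--     "' OR '",
--     "'; DROP",
--     "--",
--     "LOAD_FILE",
--     "INTO OUTFILE",
--     "INTO DUMPFILE",
--     "BENCHMARK(",
--     "SLEEP(",
--     "WAITFOR DELAY",
--     "../",
--     "password_hash",
--     "authentication_string",
--     "admin_users",
-- ]
--
--
-- def _is_suspicious(query: str) -> bool:
--     # One left-to-right pass: at each position check whether some pattern starts there,
--     # instead of sixteen independent substring scans of the whole query.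
--     q_upper = query.upper()
--     return any(
--         q_upper.startswith(pattern, i)
--         for i in range(len(q_upper))
--         for pattern in _PATTERNS
--     )
-- ===== Notes on version B (the rewrite author's own statement) =====
-- stated objective: alternative
-- what changed: Replaces sixteen independent whole-string substring scans (one 'in' test per pattern) by a single left-to-right pass over the query that checks at each position whether any pattern starts there.
import Mathlib
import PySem

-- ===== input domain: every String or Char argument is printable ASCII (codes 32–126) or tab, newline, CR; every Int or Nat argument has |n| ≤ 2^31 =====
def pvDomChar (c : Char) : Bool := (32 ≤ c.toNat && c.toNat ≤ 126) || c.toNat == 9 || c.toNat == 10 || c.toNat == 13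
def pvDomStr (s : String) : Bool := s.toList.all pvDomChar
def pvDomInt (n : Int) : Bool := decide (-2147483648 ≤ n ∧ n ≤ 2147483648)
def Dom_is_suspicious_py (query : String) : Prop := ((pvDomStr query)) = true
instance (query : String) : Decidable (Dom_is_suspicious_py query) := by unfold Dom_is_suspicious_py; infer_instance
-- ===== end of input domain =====

-- B replaces A's sixteen whole-string substring scans by one left-to-right pass that checks, at each position, whether some pattern starts there (alternative decomposition, same cost).


-- ===== PORT A =====
-- sixteen independent 'pattern in q_upper' substring scans
def pvPatterns : List String := ["UNION SELECT", "OR 1=1", "AND 1=1", "' OR '", "'; DROP", "--", "LOAD_FILE", "INTO OUTFILE", "INTO DUMPFILE", "BENCHMARK(", "SLEEP(", "WAITFOR DELAY", "../", "password_hash", "authentication_string", "admin_users"]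

def is_suspicious_py (query : String) : Bool :=
  let q_upper := PySem.Str.upper query
  pvPatterns.any (fun pattern => PySem.Str.isIn pattern q_upper)

-- ===== PORT B =====
-- single pass over positions; q_upper.startswith(pattern, i) with 0 ≤ i ≤ len is exactly
-- 'pattern is a prefix of q_upper dropped at i' (ported by hand: startswith's start argument)
def is_suspicious_py_alt (query : String) : Bool :=
  let q_upper := PySem.Chars.upper query.toList
  (PySem.List.pyRange 0 q_upper.length 1).any (fun i =>
    pvPatterns.any (fun pattern => PySem.Chars.startswith (q_upper.drop i.toNat) pattern.toList))

-- ===== PRECONDITION & SPEC =====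
def Spec_is_suspicious_py (query : String) (out : Bool) : Prop := out = is_suspicious_py_alt query
instance (query : String) (out : Bool) : Decidable (Spec_is_suspicious_py query out) := by unfold Spec_is_suspicious_py; infer_instance

-- ===== CLAIM (what is proved, stated in full; the proofs are below) =====
def Claim_equal_is_suspicious_py : Prop := ∀ (query : String), Dom_is_suspicious_py query → Spec_is_suspicious_py query (is_suspicious_py query)

-- ===== LEMMAS AND PROOFS =====
-- infix occurrence ↔ some drop position carries it as a prefix (nonempty needle)
theorem pv_infix_iff_exists_drop {α : Type} (p q : List α) (hp : p ≠ []) :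
    p <:+: q ↔ ∃ i, i < q.length ∧ p <+: q.drop i := by
  constructor
  · rintro ⟨t, s, rfl⟩
    refine ⟨t.length, ?_, ?_⟩
    · have : 0 < p.length := List.length_pos_iff.mpr hp
      simp [List.length_append]; omega
    · simp
  · rintro ⟨i, hi, hpre⟩
    exact hpre.isInfix.trans (List.drop_suffix i q).isInfix

theorem pv_agree (query : String) : is_suspicious_py query = is_suspicious_py_alt query := by
  unfold is_suspicious_py is_suspicious_py_alt
  have hne : ∀ p ∈ pvPatterns, p.toList ≠ [] := by decide
  simp only [PySem.List.pyRange_zero_nat]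
  rw [Bool.eq_iff_iff]
  simp only [List.any_eq_true, List.any_map, List.mem_range, Function.comp,
    PySem.Str.isIn_eq, PySem.Chars.isIn_iff_infix, PySem.Chars.startswith_iff,
    PySem.Str.toList_upper, Int.toNat_natCast]
  constructor
  · rintro ⟨p, hp, hinf⟩
    obtain ⟨i, hi, hpre⟩ := (pv_infix_iff_exists_drop _ _ (hne p hp)).mp hinf
    exact ⟨i, hi, p, hp, hpre⟩
  · rintro ⟨i, hi, p, hp, hpre⟩
    exact ⟨p, hp, (pv_infix_iff_exists_drop _ _ (hne p hp)).mpr ⟨i, hi, hpre⟩⟩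

-- ===== VERDICT (by name: the statement is the Claim_ definition above) =====
theorem is_suspicious_py_spec : Claim_equal_is_suspicious_py := by
  intro query _
  unfold Spec_is_suspicious_py
  exact pv_agree query
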